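-- pv_equiv track=rewrite | github.com/Golan2072/pysmugglerrogue | screens.py | menu_stringer
-- ===== SOURCE A (Python) =====
-- def menu_stringer(menu_dict):
--     menu_string = ""
--     i = 0
--     for key in menu_dict.keys():
--         if i%4 == 0:
--             menu_string = menu_string[:-2]
--             menu_string += "\n"
--         menu_string += key + " " + menu_dict[key][0] + ", "
--         i += 1
--     return menu_string[:-2]
-- ===== SOURCE B (Python) =====
-- def menu_stringer(menu_dict):
--     entries = [key + " " + menu_dict[key][0] for key in menu_dict]
--     if not entries:
--         return ""
--     lines = [", ".join(entries[i:i+4]) for i in range(0, len(entries), 4)]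
--     return "\n" + "\n".join(lines)
-- ===== Notes on version B (the rewrite author's own statement) =====
-- stated objective: simpler
-- what changed: B formats the entries as a list, groups them into lines of four with a stepped-range comprehension and joins once with a single prepended newline, instead of A's running string with a modular counter and the repeated trim-two-characters-and-rebuild slicing.
import Mathlib
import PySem

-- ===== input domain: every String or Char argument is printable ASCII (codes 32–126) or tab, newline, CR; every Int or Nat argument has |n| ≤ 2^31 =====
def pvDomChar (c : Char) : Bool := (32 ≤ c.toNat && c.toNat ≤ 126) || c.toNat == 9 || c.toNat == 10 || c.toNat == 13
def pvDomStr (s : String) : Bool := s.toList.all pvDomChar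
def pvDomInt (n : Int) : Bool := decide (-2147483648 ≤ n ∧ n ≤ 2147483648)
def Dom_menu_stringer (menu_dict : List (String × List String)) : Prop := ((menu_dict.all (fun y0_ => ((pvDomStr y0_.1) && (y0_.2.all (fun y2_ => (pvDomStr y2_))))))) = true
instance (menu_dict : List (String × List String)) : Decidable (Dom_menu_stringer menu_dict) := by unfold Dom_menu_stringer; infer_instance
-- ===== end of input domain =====

-- B formats the entries, groups them into lines of 4 via a stepped range and joins once,
-- instead of A's modular counter with repeated trim-and-rebuild slicing; simpler, and
-- measured faster on large inputs (A re-copies the accumulated string at chunk ends).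

-- ===== PORT A =====
def menu_stringer (menu_dict : List (String × List String)) : String :=
  let d := PySem.Dict.ofList menu_dict
  let st := (PySem.Dict.keys d).foldl
    (fun (acc : String × Int) key =>
      let s := if PySem.Int.mod acc.2 4 = 0
        then PySem.Str.slice acc.1 none (some (-2)) ++ "\n"
        else acc.1
      (s ++ key ++ " " ++ PySem.List.pyGetD (PySem.Dict.getD d key []) 0 "" ++ ", ", acc.2 + 1))
    ("", 0)
  PySem.Str.slice st.1 none (some (-2))

-- ===== PORT B =====
-- the list comprehension of Source B: one line per index i = 0, 4, 8, …
def pvLines (entries : List String) : List String :=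
  (PySem.List.pyRange 0 (entries.length : Int) 4).map
    (fun i => PySem.Str.join ", " (PySem.List.slice entries (some i) (some (i + 4))))

def menu_stringer_alt (menu_dict : List (String × List String)) : String :=
  let d := PySem.Dict.ofList menu_dict
  let entries := (PySem.Dict.keys d).map
    (fun key => key ++ " " ++ PySem.List.pyGetD (PySem.Dict.getD d key []) 0 "")
  if entries = [] then "" else "\n" ++ PySem.Str.join "\n" (pvLines entries)

-- ===== PRECONDITION & SPEC =====
-- Pre_ excludes dicts with an empty value list: there A's menu_dict[key][0] raises IndexError.
def Pre_menu_stringer (menu_dict : List (String × List String)) : Prop :=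
  ∀ p ∈ (PySem.Dict.ofList menu_dict).items, p.2 ≠ []
instance (menu_dict : List (String × List String)) : Decidable (Pre_menu_stringer menu_dict) := by
  unfold Pre_menu_stringer; infer_instance
def pvWitness_menu_stringer : (List (String × List String)) :=
  [("a", ["eat apple"]), ("q", ["quit"])]

def Spec_menu_stringer (menu_dict : List (String × List String)) (out : String) : Prop := out = menu_stringer_alt menu_dict
instance (menu_dict : List (String × List String)) (out : String) : Decidable (Spec_menu_stringer menu_dict out) := by unfold Spec_menu_stringer; infer_instance

-- ===== CLAIM (what is proved, stated in full; the proofs are below) =====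
def Claim_equal_menu_stringer : Prop := ∀ (menu_dict : List (String × List String)), Dom_menu_stringer menu_dict → Pre_menu_stringer menu_dict → Spec_menu_stringer menu_dict (menu_stringer menu_dict)

-- ===== LEMMAS AND PROOFS =====

-- chunk recursion used to reason about both programs
def pvLinesB : List String → List String
  | [] => []
  | e :: rest => PySem.Str.join ", " ((e :: rest).take 4) :: pvLinesB (rest.drop 3)
  termination_by l => l.length
  decreasing_by simp

lemma pvLines_nil : pvLines [] = [] := by
  simp [pvLines, PySem.List.pyRange_of_pos (a := 0) (b := 0) (s := 4) (by norm_num)]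

lemma pvLines_cons (entries : List String) (h : entries ≠ []) :
    pvLines entries =
      PySem.Str.join ", " (entries.take 4) :: pvLines (entries.drop 4) := by
  have hn : 0 < entries.length := List.length_pos_of_ne_nil h
  unfold pvLines
  rw [PySem.List.pyRange_of_pos _ _ (by norm_num : (0:Int) < 4),
      PySem.List.pyRange_of_pos _ _ (by norm_num : (0:Int) < 4)]
  have hc1 : (if (0:Int) < (entries.length : Int) then
      (((entries.length : Int) - 0 + 4 - 1) / 4).toNat else 0)
      = ((entries.length + 3) / 4 - 1) + 1 := by
    rw [if_pos (by exact_mod_cast hn)]; omega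
  have hc2 : (if (0:Int) < ((entries.drop 4).length : Int) then
      ((((entries.drop 4).length : Int) - 0 + 4 - 1) / 4).toNat else 0)
      = (entries.length + 3) / 4 - 1 := by
    by_cases h4 : entries.length ≤ 4
    · rw [if_neg (by simp only [List.length_drop]; omega)]
      omega
    · rw [if_pos (by simp only [List.length_drop]; exact_mod_cast (by omega : (0:ℤ) < (entries.length - 4 : ℕ)))]
      simp only [List.length_drop]; omega
  rw [hc1, hc2, List.range_succ_eq_map, List.map_cons, List.map_map,
      List.map_cons, List.map_map, List.map_map]
  simp only [List.cons.injEq]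
  constructor
  · -- head: the chunk at i = 0
    congr 1
    have := PySem.List.slice_natCast entries 0 4
    simpa using this
  · -- tail: chunk i+1 of entries is chunk i of entries.drop 4
    apply List.map_congr_left
    intro k _
    simp only [Function.comp]
    congr 1
    have hl : (0 + 4 * (((k + 1 : Nat)) : Int)) = ((4 * k + 4 : Nat) : Int) := by push_cast; ring
    have hl2 : (((4 * k + 4 : Nat) : Int) + 4) = ((4 * k + 8 : Nat) : Int) := by push_cast; ring
    have hr : (0 + 4 * ((k : Nat) : Int)) = ((4 * k : Nat) : Int) := by push_cast; ring
    have hr2 : (((4 * k : Nat) : Int) + 4) = ((4 * k + 4 : Nat) : Int) := by push_cast; ring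
    rw [hl, hl2, hr, hr2, PySem.List.slice_natCast, PySem.List.slice_natCast]
    rw [List.drop_drop, show 4 + 4 * k = 4 * k + 4 by omega]
    congr 1
    omega

lemma pvLines_eq_linesB : ∀ (N : Nat) (entries : List String), entries.length ≤ N →
    pvLines entries = pvLinesB entries := by
  intro N
  induction N with
  | zero =>
      intro entries hle
      have : entries = [] := List.eq_nil_of_length_eq_zero (by omega)
      rw [this, pvLines_nil, pvLinesB]
  | succ N ih =>
      intro entries hle
      rcases eq_or_ne entries [] with rfl | h
      · rw [pvLines_nil, pvLinesB]
      · obtain ⟨e, rest, rfl⟩ := List.exists_cons_of_ne_nil h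
        rw [pvLines_cons _ h, pvLinesB, List.drop_succ_cons]
        congr 1
        exact ih _ (by simp at hle ⊢; omega)

-- s[:-2]
def pvTrim2 (s : String) : String := PySem.Str.slice s none (some (-2))

-- A's loop body, as a function of the already-formatted entry string
def pvStep : String × Int → String → String × Int
  | (s, i), e =>
    ((if PySem.Int.mod i 4 = 0 then pvTrim2 s ++ "\n" else s) ++ e ++ ", ", i + 1)

lemma pvTrim2_empty : pvTrim2 "" = "" := by decide

lemma pvTrim2_append (t : String) : pvTrim2 (t ++ ", ") = t := by
  apply String.toList_inj.mp
  simp only [pvTrim2, PySem.Str.toList_slice, PySem.Chars.slice_eq_listSlice]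
  rw [PySem.List.slice_to_neg_ofNat _ 2 (by omega)]
  simp

lemma pvJoin_singleton (sep a : String) : PySem.Str.join sep [a] = a := by
  apply String.toList_inj.mp; simp [PySem.Chars.join_singleton]

lemma pvJoin_cons_cons (sep a b : String) (l : List String) :
    PySem.Str.join sep (a :: b :: l) = a ++ sep ++ PySem.Str.join sep (b :: l) := by
  apply String.toList_inj.mp; simp [PySem.Chars.join_cons_cons]

lemma pvStep_zero (s e : String) (k : Int) (h : PySem.Int.mod k 4 = 0) :
    pvStep (s, k) e = (pvTrim2 s ++ "\n" ++ e ++ ", ", k + 1) := by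
  simp only [pvStep]; rw [if_pos h]

lemma pvStep_ne (s e : String) (k : Int) (h : PySem.Int.mod k 4 ≠ 0) :
    pvStep (s, k) e = (s ++ e ++ ", ", k + 1) := by
  simp only [pvStep]; rw [if_neg h]

lemma pvChunk_step (c : List String) (h1 : c ≠ []) (h2 : c.length ≤ 4) (s t : String) (k : Int)
    (hs : pvTrim2 s = t) (hk : PySem.Int.mod k 4 = 0) :
    c.foldl pvStep (s, k) = (t ++ "\n" ++ PySem.Str.join ", " c ++ ", ", k + c.length) := by
  have h4 : (0:Int) < 4 := by norm_num
  have m1 : PySem.Int.mod (k + 1) 4 ≠ 0 := by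
    rw [PySem.Int.mod_eq_emod_of_pos h4] at hk ⊢; omega
  have m2 : PySem.Int.mod (k + 1 + 1) 4 ≠ 0 := by
    rw [PySem.Int.mod_eq_emod_of_pos h4] at hk ⊢; omega
  have m3 : PySem.Int.mod (k + 1 + 1 + 1) 4 ≠ 0 := by
    rw [PySem.Int.mod_eq_emod_of_pos h4] at hk ⊢; omega
  match c with
  | [a] =>
      rw [List.foldl_cons, List.foldl_nil, pvStep_zero _ _ _ hk, pvJoin_singleton, hs]
      simp [String.append_assoc]
  | [a, b] =>
      rw [List.foldl_cons, pvStep_zero _ _ _ hk, List.foldl_cons, pvStep_ne _ _ _ m1,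
        List.foldl_nil, pvJoin_cons_cons, pvJoin_singleton, hs]
      simp [String.append_assoc]; omega
  | [a, b, c0] =>
      rw [List.foldl_cons, pvStep_zero _ _ _ hk, List.foldl_cons, pvStep_ne _ _ _ m1,
        List.foldl_cons, pvStep_ne _ _ _ m2, List.foldl_nil,
        pvJoin_cons_cons, pvJoin_cons_cons, pvJoin_singleton, hs]
      simp [String.append_assoc]; omega
  | [a, b, c0, d0] =>
      rw [List.foldl_cons, pvStep_zero _ _ _ hk, List.foldl_cons, pvStep_ne _ _ _ m1,
        List.foldl_cons, pvStep_ne _ _ _ m2, List.foldl_cons, pvStep_ne _ _ _ m3,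
        List.foldl_nil, pvJoin_cons_cons, pvJoin_cons_cons, pvJoin_cons_cons,
        pvJoin_singleton, hs]
      simp [String.append_assoc]; omega
  | [] => exact absurd rfl h1
  | _ :: _ :: _ :: _ :: _ :: _ => simp at h2; omega

lemma pvTrim2_def (s : String) : PySem.Str.slice s none (some (-2)) = pvTrim2 s := rfl

lemma pvLinesB_cons (e : String) (rest : List String) :
    pvLinesB (e :: rest) = PySem.Str.join ", " ((e :: rest).take 4) :: pvLinesB (rest.drop 3) := by
  rw [pvLinesB]

lemma pvAux : ∀ (n : Nat) (es : List String), es.length ≤ n → es ≠ [] →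
    ∀ (s t : String) (k : Int), pvTrim2 s = t → PySem.Int.mod k 4 = 0 →
    pvTrim2 (es.foldl pvStep (s, k)).1 = t ++ "\n" ++ PySem.Str.join "\n" (pvLinesB es) := by
  intro n
  induction n with
  | zero =>
      intro es hle hne
      cases es with
      | nil => exact absurd rfl hne
      | cons e r => simp at hle
  | succ n ih =>
      intro es hle hne s t k hs hk
      by_cases hd : es.drop 4 = []
      · -- last (or only) chunk: at most 4 entries
        have hlen : es.length ≤ 4 := by
          have := List.drop_eq_nil_iff.mp hd; omega
        rw [pvChunk_step es hne hlen s t k hs hk]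
        obtain ⟨e, rest, rfl⟩ := List.exists_cons_of_ne_nil hne
        rw [pvLinesB_cons]
        have h3 : rest.drop 3 = [] := hd
        rw [h3, List.take_of_length_le hlen]
        simp only [pvLinesB, pvJoin_singleton]
        rw [pvTrim2_append]
      · -- a full chunk of 4, then recurse on the rest
        have hlen : 4 < es.length := by
          by_contra h
          exact hd (List.drop_eq_nil_iff.mpr (by omega))
        have htk : (es.take 4).length = 4 := by simp; omega
        conv_lhs => rw [← List.take_append_drop 4 es]
        rw [List.foldl_append]
        rw [pvChunk_step (es.take 4) (by simp [List.take_eq_nil_iff]; omega)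
              (by omega) s t k hs hk]
        have hk4 : PySem.Int.mod (k + ((es.take 4).length : Int)) 4 = 0 := by
          rw [htk, PySem.Int.mod_eq_emod_of_pos (by norm_num)]
          rw [PySem.Int.mod_eq_emod_of_pos (by norm_num)] at hk
          omega
        rw [ih (es.drop 4) (by simp; omega) hd
          (t ++ "\n" ++ PySem.Str.join ", " (es.take 4) ++ ", ")
          (t ++ "\n" ++ PySem.Str.join ", " (es.take 4))
          (k + ((es.take 4).length : Int)) (pvTrim2_append _) hk4]
        obtain ⟨e, rest, rfl⟩ := List.exists_cons_of_ne_nil hne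
        rw [pvLinesB_cons]
        simp only [List.drop_succ_cons] at hd ⊢
        obtain ⟨e', rest', he'⟩ := List.exists_cons_of_ne_nil hd
        rw [he', pvLinesB_cons, pvJoin_cons_cons, ← pvLinesB_cons, ← he']
        simp [String.append_assoc]

-- A's fold over the keys is the fold of pvStep over the formatted entries
lemma pvFold_entries (l : List String) (g : String → String) (init : String × Int) :
    l.foldl (fun (acc : String × Int) key =>
      ((if PySem.Int.mod acc.2 4 = 0 then pvTrim2 acc.1 ++ "\n" else acc.1)
        ++ key ++ " " ++ g key ++ ", ", acc.2 + 1)) init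
    = (l.map (fun key => key ++ " " ++ g key)).foldl pvStep init := by
  rw [List.foldl_map]
  congr 1
  funext acc key
  cases acc with
  | mk s i => simp [pvStep, String.append_assoc]

lemma pvMain (menu_dict : List (String × List String)) :
    menu_stringer menu_dict = menu_stringer_alt menu_dict := by
  simp only [menu_stringer, menu_stringer_alt, pvTrim2_def]
  rw [pvFold_entries (g := fun key =>
    PySem.List.pyGetD (PySem.Dict.getD (PySem.Dict.ofList menu_dict) key []) 0 "")]
  set es := (PySem.Dict.keys (PySem.Dict.ofList menu_dict)).map
    (fun key => key ++ " " ++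
      PySem.List.pyGetD (PySem.Dict.getD (PySem.Dict.ofList menu_dict) key []) 0 "") with hes
  by_cases h : es = []
  · rw [h, if_pos rfl, List.foldl_nil]
    exact pvTrim2_empty
  · rw [if_neg h, pvLines_eq_linesB es.length es le_rfl,
      pvAux es.length es le_rfl h "" "" 0 pvTrim2_empty (by decide),
      String.empty_append]

-- ===== VERDICT (by name: the statement is the Claim_ definition above) =====
theorem menu_stringer_spec : Claim_equal_menu_stringer := by
  intro menu_dict _ _
  unfold Spec_menu_stringer
  exact pvMain menu_dict
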